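-- pv_equiv track=rewrite | github.com/aoc4fun/allinone2023 | Valynor/day14.py | gravity_line
-- ===== SOURCE A (Python) =====
-- def gravity_line(dataline):
--     result=[]
--     dotcount, ocount=0,0
--     for i in range(0,len(dataline)):
--         if dataline[i]==".":
--             dotcount+=1
--         if dataline[i]=="O":
--             ocount+=1
--         if dataline[i]=="#":
--             result.append("."*dotcount+"O"*ocount+"#")
--             dotcount, ocount = 0, 0
--     result.append("." * dotcount + "O" * ocount)
--     return "".join(result)
-- ===== SOURCE B (Python) =====
-- def gravity_line(dataline):
--     segments = dataline.split("#")
--     return "#".join("." * seg.count(".") + "O" * seg.count("O") for seg in segments)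
-- ===== Notes on version B (the rewrite author's own statement) =====
-- stated objective: idiomatic
-- what changed: Replaces the single character-by-character loop with mutable counters and a result list by a split-on-walls / count-per-segment / join decomposition using str.split, str.count and str.join.
import Mathlib
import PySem

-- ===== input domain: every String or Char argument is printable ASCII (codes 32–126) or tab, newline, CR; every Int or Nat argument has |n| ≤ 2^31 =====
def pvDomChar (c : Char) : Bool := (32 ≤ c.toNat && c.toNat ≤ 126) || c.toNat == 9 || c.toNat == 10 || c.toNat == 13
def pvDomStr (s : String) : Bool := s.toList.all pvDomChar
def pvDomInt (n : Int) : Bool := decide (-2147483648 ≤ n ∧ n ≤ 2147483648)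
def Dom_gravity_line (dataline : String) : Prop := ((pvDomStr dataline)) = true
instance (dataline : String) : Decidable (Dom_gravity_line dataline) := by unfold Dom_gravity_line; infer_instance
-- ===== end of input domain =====

-- B replaces A's single counter loop by a split-on-walls / count-per-segment / join decomposition (idiomatic; a timing run measured it faster by a constant factor).


-- ===== PORT A =====
-- the loop body: three successive 'if's on the current character, over the state (result, dotcount, ocount)
def gravAStep (st : List (List Char) × Nat × Nat) (c : Char) : List (List Char) × Nat × Nat :=
  let d := if c = '.' then st.2.1 + 1 else st.2.1
  let o := if c = 'O' then st.2.2 + 1 else st.2.2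
  if c = '#' then (st.1 ++ [List.replicate d '.' ++ List.replicate o 'O' ++ ['#']], 0, 0)
  else (st.1, d, o)

def gravity_line (dataline : String) : String :=
  let st := dataline.toList.foldl gravAStep ([], 0, 0)
  String.ofList ((st.1 ++ [List.replicate st.2.1 '.' ++ List.replicate st.2.2 'O']).flatten)

-- ===== PORT B =====
-- '.' * seg.count('.') + 'O' * seg.count('O')
def gravNorm (seg : List Char) : List Char :=
  List.replicate (PySem.Chars.count seg ['.']) '.' ++ List.replicate (PySem.Chars.count seg ['O']) 'O'

def gravity_line_alt (dataline : String) : String :=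
  String.ofList (PySem.Chars.join ['#'] ((PySem.Chars.splitOn dataline.toList ['#']).map gravNorm))

-- ===== PRECONDITION & SPEC =====
def Spec_gravity_line (dataline : String) (out : String) : Prop := out = gravity_line_alt dataline
instance (dataline : String) (out : String) : Decidable (Spec_gravity_line dataline out) := by unfold Spec_gravity_line; infer_instance

-- ===== CLAIM (what is proved, stated in full; the proofs are below) =====
def Claim_equal_gravity_line : Prop := ∀ (dataline : String), Dom_gravity_line dataline → Spec_gravity_line dataline (gravity_line dataline)

-- ===== LEMMAS AND PROOFS =====

-- structural form of split on the single character '#'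
def splitH : List Char → List (List Char)
  | [] => [[]]
  | c :: cs => if c = '#' then [] :: splitH cs else (splitH cs).modifyHead (c :: ·)

theorem splitH_ne_nil (l : List Char) : splitH l ≠ [] := by
  cases l with
  | nil => simp [splitH]
  | cons c cs =>
    simp only [splitH]
    split_ifs <;> simp
    intro h
    exact splitH_ne_nil cs (by simpa using congrArg List.length h)

theorem go_singleton (fuel : Nat) : ∀ (l cur : List Char) (acc : List (List Char)),
    l.length ≤ fuel →
    PySem.Chars.splitOn.go ['#'] fuel l cur acc
      = acc.reverse ++ (splitH l).modifyHead (cur.reverse ++ ·) := by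
  induction fuel with
  | zero =>
    intro l cur acc h
    have : l = [] := List.length_eq_zero_iff.mp (Nat.le_zero.mp h)
    subst this
    simp [PySem.Chars.splitOn.go, splitH]
  | succ f ih =>
    intro l cur acc h
    cases l with
    | nil => simp [PySem.Chars.splitOn.go, splitH]
    | cons c rest =>
      by_cases hc : c = '#'
      · subst hc
        rw [show PySem.Chars.splitOn.go ['#'] (f+1) ('#' :: rest) cur acc
              = PySem.Chars.splitOn.go ['#'] f rest [] (cur.reverse :: acc) by
            simp [PySem.Chars.splitOn.go, List.isPrefixOf]]
        rw [ih rest [] (cur.reverse :: acc) (by simpa using Nat.le_of_succ_le_succ h)]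
        obtain ⟨h₁, t₁, hs⟩ := List.exists_cons_of_ne_nil (splitH_ne_nil rest)
        simp [splitH, hs]
      · rw [show PySem.Chars.splitOn.go ['#'] (f+1) (c :: rest) cur acc
              = PySem.Chars.splitOn.go ['#'] f rest (c :: cur) acc by
            simp [PySem.Chars.splitOn.go, List.isPrefixOf]
            exact fun h => absurd h.symm hc]
        rw [ih rest (c :: cur) acc (by simpa using Nat.le_of_succ_le_succ h)]
        obtain ⟨h₁, t₁, hs⟩ := List.exists_cons_of_ne_nil (splitH_ne_nil rest)
        simp [splitH, hs, hc]

theorem splitOn_singleton (l : List Char) :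
    PySem.Chars.splitOn l ['#'] = splitH l := by
  unfold PySem.Chars.splitOn
  rw [go_singleton (l.length + 1) l [] [] (Nat.le_succ _)]
  obtain ⟨h₁, t₁, hs⟩ := List.exists_cons_of_ne_nil (splitH_ne_nil l)
  simp [hs]

-- PySem.Chars.count of a single-character needle is List.count
theorem count_go_singleton (c : Char) (fuel : Nat) : ∀ (l : List Char) (acc : Nat),
    l.length ≤ fuel →
    PySem.Chars.count.go [c] fuel l acc = acc + l.count c := by
  induction fuel with
  | zero =>
    intro l acc h
    have : l = [] := List.length_eq_zero_iff.mp (Nat.le_zero.mp h)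
    subst this
    simp [PySem.Chars.count.go]
  | succ f ih =>
    intro l acc h
    cases l with
    | nil => simp [PySem.Chars.count.go]
    | cons x rest =>
      by_cases hx : x = c
      · subst hx
        rw [show PySem.Chars.count.go [x] (f+1) (x :: rest) acc
              = PySem.Chars.count.go [x] f rest (acc + 1) by
            simp [PySem.Chars.count.go, List.isPrefixOf]]
        rw [ih rest (acc + 1) (by simpa using Nat.le_of_succ_le_succ h)]
        simp
        omega
      · rw [show PySem.Chars.count.go [c] (f+1) (x :: rest) acc
              = PySem.Chars.count.go [c] f rest acc by
            simp [PySem.Chars.count.go, List.isPrefixOf]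
            exact fun h => absurd h.symm hx]
        rw [ih rest acc (by simpa using Nat.le_of_succ_le_succ h)]
        simp [hx]

theorem count_singleton (l : List Char) (c : Char) :
    PySem.Chars.count l [c] = l.count c := by
  unfold PySem.Chars.count
  simp [count_go_singleton c l.length l 0 le_rfl]

-- join '#' as a flatMap
theorem join_hash (x : List Char) (xs : List (List Char)) :
    PySem.Chars.join ['#'] (x :: xs) = x ++ xs.flatMap (fun s => '#' :: s) := by
  induction xs generalizing x with
  | nil => simp [PySem.Chars.join, List.intercalate]
  | cons y ys ih =>
    have h := ih y
    simp only [PySem.Chars.join, List.intercalate] at h ⊢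
    simp [List.intersperse, List.flatten] at h ⊢
    simp [h]

-- the tail of A's computation, as a function of the remaining segments and the running counters
def glue (d o : Nat) : List (List Char) → List Char
  | [] => List.replicate d '.' ++ List.replicate o 'O'
  | h :: t => List.replicate (d + h.count '.') '.' ++ List.replicate (o + h.count 'O') 'O'
      ++ (t.map (fun s => List.replicate (s.count '.') '.' ++ List.replicate (s.count 'O') 'O')).flatMap (fun s => '#' :: s)

-- A's final step applied to a loop state
def finishA (st : List (List Char) × Nat × Nat) : List Char :=
  (st.1 ++ [List.replicate st.2.1 '.' ++ List.replicate st.2.2 'O']).flatten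

theorem foldl_glue (l : List Char) : ∀ (res : List (List Char)) (d o : Nat),
    finishA (l.foldl gravAStep (res, d, o)) = res.flatten ++ glue d o (splitH l) := by
  induction l with
  | nil => intro res d o; simp [finishA, splitH, glue]
  | cons c cs ih =>
    intro res d o
    obtain ⟨h₁, t₁, hs⟩ := List.exists_cons_of_ne_nil (splitH_ne_nil cs)
    by_cases h1 : c = '#'
    · subst h1
      rw [show List.foldl gravAStep (res, d, o) ('#' :: cs)
            = List.foldl gravAStep (res ++ [List.replicate d '.' ++ List.replicate o 'O' ++ ['#']], 0, 0) cs by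
          simp [gravAStep]]
      rw [ih]
      simp [splitH, glue, hs]
    · by_cases h2 : c = '.'
      · subst h2
        rw [show List.foldl gravAStep (res, d, o) ('.' :: cs)
              = List.foldl gravAStep (res, d + 1, o) cs by simp [gravAStep]]
        rw [ih]
        simp [splitH, glue, hs]
        omega
      · by_cases h3 : c = 'O'
        · subst h3
          rw [show List.foldl gravAStep (res, d, o) ('O' :: cs)
                = List.foldl gravAStep (res, d, o + 1) cs by simp [gravAStep]]
          rw [ih]
          simp [splitH, glue, hs]
          omega
        · rw [show List.foldl gravAStep (res, d, o) (c :: cs)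
                = List.foldl gravAStep (res, d, o) cs by simp [gravAStep, h1, h2, h3]]
          rw [ih]
          simp [splitH, glue, hs, h1, h2, h3]

theorem glue_zero (segs : List (List Char)) (hne : segs ≠ []) :
    glue 0 0 segs
      = PySem.Chars.join ['#'] (segs.map (fun s => List.replicate (s.count '.') '.' ++ List.replicate (s.count 'O') 'O')) := by
  obtain ⟨h₁, t₁, hs⟩ := List.exists_cons_of_ne_nil hne
  subst hs
  simp [glue, join_hash]

-- ===== VERDICT (by name: the statement is the Claim_ definition above) =====
theorem gravity_line_spec : Claim_equal_gravity_line := by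
  intro dataline _
  unfold Spec_gravity_line gravity_line gravity_line_alt
  show String.ofList (finishA (dataline.toList.foldl gravAStep ([], 0, 0)))
      = String.ofList (PySem.Chars.join ['#'] ((PySem.Chars.splitOn dataline.toList ['#']).map gravNorm))
  congr 1
  rw [foldl_glue dataline.toList [] 0 0, splitOn_singleton]
  simp only [List.flatten_nil, List.nil_append]
  rw [glue_zero _ (splitH_ne_nil _)]
  congr 1
  apply List.map_congr_left
  intro seg _
  simp [gravNorm, count_singleton]
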